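-- pv_equiv track=rewrite | github.com/anlutro/dotfiles | scripts/dotgraph-imports.py | locate_clusters
-- ===== SOURCE A (Python) =====
-- from collections import defaultdict
--
-- def shorten_module(module, depth):
--     return '.'.join(module.split('.')[:depth+1])
--
-- def locate_clusters(imports, depth=0):
--     all_modules = set()
--     for src_module, target_module in sorted(imports):
--         all_modules.add(src_module)
--         all_modules.add(target_module)
--     clusters = defaultdict(lambda: set())
--     for module in all_modules:
--         clusters[shorten_module(module, depth)].add(module)
--     return clusters.items()
-- ===== SOURCE B (Python) =====
-- def shorten_module(module, depth):
--     return '.'.join(module.split('.')[:depth+1])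
--
-- def locate_clusters(imports, depth=0):
--     flat = [m for pair in sorted(imports) for m in pair]
--     prefixes = list(dict.fromkeys(shorten_module(m, depth) for m in flat))
--     return [(p, {m for m in flat if shorten_module(m, depth) == p}) for p in prefixes]
-- ===== Notes on version B (the rewrite author's own statement) =====
-- stated objective: alternative
-- what changed: B removes A's dict-of-sets grouping machinery entirely: it flattens the sorted imports, takes the first-occurrence-deduplicated list of shortened prefixes, and builds the result directly as a list comprehension that selects each prefix's modules by filtering the flat list, instead of A's two-stage set-then-defaultdict accumulation.
import Mathlib
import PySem

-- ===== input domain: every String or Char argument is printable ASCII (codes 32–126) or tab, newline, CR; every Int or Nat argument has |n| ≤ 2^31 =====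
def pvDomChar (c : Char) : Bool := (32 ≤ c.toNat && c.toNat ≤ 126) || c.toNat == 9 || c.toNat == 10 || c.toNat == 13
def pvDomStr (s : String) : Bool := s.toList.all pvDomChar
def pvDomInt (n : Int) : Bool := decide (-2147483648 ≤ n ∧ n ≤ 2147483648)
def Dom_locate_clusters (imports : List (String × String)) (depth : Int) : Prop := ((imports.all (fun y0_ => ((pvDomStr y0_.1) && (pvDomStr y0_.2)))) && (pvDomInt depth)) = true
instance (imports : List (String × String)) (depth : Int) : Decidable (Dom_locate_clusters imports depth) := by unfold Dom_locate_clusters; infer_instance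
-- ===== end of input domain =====

-- B replaces A's set-then-defaultdict grouping by direct construction: flatten the sorted
-- imports, dedup the shortened prefixes, and build each cluster by filtering the flat list.
-- An alternative decomposition (no dict), not faster. Both results are compared as
-- prefix -> set-of-modules pairs; A's Python iterates a set (hash order), so entry order is
-- compared as the type convention prescribes (dict/set outputs ignore order).

-- ===== PORT A =====
-- '.'.join(module.split('.')[:depth+1]) — split? is some since the separator "." is non-empty
def shorten_module (module : String) (depth : Int) : String :=
  PySem.Str.join "." (PySem.List.slice ((PySem.Str.split? module ".").getD []) none (some (depth + 1)))

def locate_clusters (imports : List (String × String)) (depth : Int) : List (String × List String) :=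
  -- all_modules = set(); for src, tgt in sorted(imports): all_modules.add(src); all_modules.add(tgt)
  let all_modules : PySem.Set String :=
    (PySem.List.sorted2 imports (·.1) (·.2) false).foldl
      (fun s p => PySem.Set.add (PySem.Set.add s p.1) p.2) PySem.Set.empty
  -- clusters = defaultdict(set); for module in all_modules: clusters[shorten_module(module, depth)].add(module)
  let clusters : PySem.Dict String (PySem.Set String) :=
    all_modules.foldl
      (fun d m => d.modify (shorten_module m depth) PySem.Set.empty (fun s => PySem.Set.add s m))
      PySem.Dict.empty
  clusters.items

-- ===== PORT B =====
-- flat = [m for pair in sorted(imports) for m in pair]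
-- prefixes = list(dict.fromkeys(shorten_module(m, depth) for m in flat))   -- PySem.List.dedup
-- return [(p, {m for m in flat if shorten_module(m, depth) == p}) for p in prefixes]
def locate_clusters_alt (imports : List (String × String)) (depth : Int) : List (String × List String) :=
  let flat : List String :=
    (PySem.List.sorted2 imports (·.1) (·.2) false).flatMap (fun pair => [pair.1, pair.2])
  let prefixes : List String :=
    PySem.List.dedup (flat.map (fun m => shorten_module m depth))
  prefixes.map (fun p =>
    (p, PySem.Set.ofList (flat.filter (fun m => shorten_module m depth == p))))

-- ===== PRECONDITION & SPEC =====
def Spec_locate_clusters (imports : List (String × String)) (depth : Int) (out : List (String × List String)) : Prop := out = locate_clusters_alt imports depth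
instance (imports : List (String × String)) (depth : Int) (out : List (String × List String)) : Decidable (Spec_locate_clusters imports depth out) := by unfold Spec_locate_clusters; infer_instance

-- ===== CLAIM (what is proved, stated in full; the proofs are below) =====
def Claim_equal_locate_clusters : Prop := ∀ (imports : List (String × String)) (depth : Int), Dom_locate_clusters imports depth → Spec_locate_clusters imports depth (locate_clusters imports depth)

-- ===== LEMMAS AND PROOFS =====

-- The per-module dict update A's second loop performs.
def clStep (depth : Int) (d : PySem.Dict String (PySem.Set String)) (m : String) : PySem.Dict String (PySem.Set String) :=
  d.modify (shorten_module m depth) PySem.Set.empty (fun s => PySem.Set.add s m)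

-- a pair loop doing g on both components is the flat loop over the flattened list
theorem foldl_pair_flat {α β : Type} (g : β → α → β) (l : List (α × α)) (d : β) :
    l.foldl (fun d p => g (g d p.1) p.2) d = (l.flatMap (fun p => [p.1, p.2])).foldl g d := by
  induction l generalizing d with
  | nil => rfl
  | cons p t ih => simp [List.foldl_cons, ih]

theorem nodup_keys_clFold (depth : Int) (L : List String) :
    ((L.foldl (clStep depth) PySem.Dict.empty).keys).Nodup := by
  simpa [clStep, PySem.Dict.modify] using
    PySem.Dict.nodup_keys_foldl_insert_key L (fun m => shorten_module m depth)
      (fun d m => PySem.Set.add (d.getD (shorten_module m depth) PySem.Set.empty) m)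
      PySem.Dict.empty (by simp)

theorem insert_getD_self_of_contains {κ ν : Type} [BEq κ] [LawfulBEq κ]
    (d : PySem.Dict κ ν) (k : κ) (dflt : ν) (hnd : d.keys.Nodup) (hc : d.contains k = true) :
    d.insert k (d.getD k dflt) = d := by
  apply PySem.Dict.ext
  rw [PySem.Dict.items_insert_of_contains d _ hc]
  have hcong : ∀ p ∈ d.items,
      (if (p.1 == k) = true then (k, d.getD k dflt) else p) = p := by
    intro p hp
    obtain ⟨p1, p2⟩ := p
    by_cases h : p1 = k
    · subst h
      have hv : d.getD p1 dflt = p2 := PySem.Dict.getD_of_mem_items d hp hnd dflt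
      simp [hv]
    · simp [h]
  rw [List.map_congr_left hcong]
  simp

theorem mem_getD_clStep (depth : Int) (d : PySem.Dict String (PySem.Set String)) (m x : String)
    (hx : x ∈ d.getD (shorten_module x depth) PySem.Set.empty) :
    x ∈ (clStep depth d m).getD (shorten_module x depth) PySem.Set.empty := by
  unfold clStep
  rw [PySem.Dict.getD_modify]
  split_ifs with h
  · rw [h] at hx
    exact (PySem.Set.mem_add _ m x).mpr (Or.inl hx)
  · exact hx

theorem clStep_of_mem (depth : Int) (d : PySem.Dict String (PySem.Set String)) (x : String)
    (hnd : d.keys.Nodup)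
    (hx : x ∈ d.getD (shorten_module x depth) PySem.Set.empty) :
    clStep depth d x = d := by
  unfold clStep
  have hc : d.contains (shorten_module x depth) = true := by
    by_contra h
    rw [PySem.Dict.getD_of_not_contains d _ (by simpa using h)] at hx
    simp [PySem.Set.empty] at hx
  have hadd : PySem.Set.add (d.getD (shorten_module x depth) PySem.Set.empty) x
      = d.getD (shorten_module x depth) PySem.Set.empty := by
    have hx' : x ∈ d.getD (shorten_module x depth) ([] : List String) := hx
    simp [PySem.Set.add, hx']
  rw [PySem.Dict.modify, hadd, insert_getD_self_of_contains _ _ _ hnd hc]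

-- folding clStep over the deduplicated list gives the same dict,
-- and every processed module is a member of its cluster's set
theorem clFold_master (depth : Int) (L : List String) :
    (PySem.Set.ofList L).foldl (clStep depth) PySem.Dict.empty
      = L.foldl (clStep depth) PySem.Dict.empty
    ∧ ∀ m ∈ L, m ∈ (L.foldl (clStep depth) PySem.Dict.empty).getD (shorten_module m depth) PySem.Set.empty := by
  induction L using List.reverseRecOn with
  | nil => simp [PySem.Set.ofList, PySem.Set.empty]
  | append_singleton t x ih =>
    obtain ⟨ih1, ih2⟩ := ih
    have hofl : PySem.Set.ofList (t ++ [x]) = PySem.Set.add (PySem.Set.ofList t) x := by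
      simp [PySem.Set.ofList, List.foldl_append]
    have hmem : ∀ m ∈ t ++ [x],
        m ∈ ((t ++ [x]).foldl (clStep depth) PySem.Dict.empty).getD (shorten_module m depth) PySem.Set.empty := by
      intro m hm
      rw [List.foldl_append]
      rcases List.mem_append.mp hm with h | h
      · exact mem_getD_clStep depth _ x m (ih2 m h)
      · have hx : m = x := by simpa using h
        subst hx
        simp [clStep, PySem.Dict.getD_modify_self, PySem.Set.mem_add]
    refine ⟨?_, hmem⟩
    rw [hofl, List.foldl_append]
    by_cases hx : x ∈ PySem.Set.ofList t
    · have hxt : x ∈ t := (PySem.Set.mem_ofList t x).mp hx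
      have heq : PySem.Set.add (PySem.Set.ofList t) x = PySem.Set.ofList t := by
        simp [PySem.Set.add, hxt]
      rw [heq, ih1]
      simp only [List.foldl_cons, List.foldl_nil]
      exact (clStep_of_mem depth _ x (nodup_keys_clFold depth t) (ih2 x hxt)).symm
    · have hxt : x ∉ t := fun h => hx ((PySem.Set.mem_ofList t x).mpr h)
      have heq : PySem.Set.add (PySem.Set.ofList t) x = PySem.Set.ofList t ++ [x] := by
        simp [PySem.Set.add, hxt]
      rw [heq, List.foldl_append, ih1]

-- MAIN: the items of A's grouping fold over any module list L are exactly B's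
-- dedup-of-prefixes list, each paired with the ofList of the matching filter of L.
theorem clFold_items (depth : Int) (L : List String) :
    (L.foldl (clStep depth) PySem.Dict.empty).items
      = (PySem.Set.ofList (L.map (fun m => shorten_module m depth))).map
          (fun p => (p, PySem.Set.ofList (L.filter (fun m => shorten_module m depth == p)))) := by
  induction L using List.reverseRecOn with
  | nil => rfl
  | append_singleton L x ih =>
    have hnd := nodup_keys_clFold depth L
    have hkeys : (L.foldl (clStep depth) PySem.Dict.empty).keys
        = PySem.Set.ofList (L.map (fun m => shorten_module m depth)) := by
      show (List.foldl (clStep depth) PySem.Dict.empty L).items.map (·.1) = _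
      rw [ih, List.map_map]
      exact List.map_id _
    have hfoldl : (L ++ [x]).foldl (clStep depth) PySem.Dict.empty
        = (L.foldl (clStep depth) PySem.Dict.empty).insert (shorten_module x depth)
            (PySem.Set.add ((L.foldl (clStep depth) PySem.Dict.empty).getD
              (shorten_module x depth) PySem.Set.empty) x) := by
      rw [List.foldl_append]; rfl
    have hofl : ∀ (l : List String) (y : String),
        PySem.Set.ofList (l ++ [y]) = PySem.Set.add (PySem.Set.ofList l) y := by
      intro l y; simp [PySem.Set.ofList_eq_foldl, List.foldl_append]
    have hfilter : ∀ p, (L ++ [x]).filter (fun m => shorten_module m depth == p)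
        = L.filter (fun m => shorten_module m depth == p)
          ++ if shorten_module x depth == p then [x] else [] := by
      intro p
      by_cases h : shorten_module x depth = p
      · subst h; simp [List.filter_append]
      · simp [List.filter_append, h]
    have hmapappend : (L ++ [x]).map (fun m => shorten_module m depth)
        = L.map (fun m => shorten_module m depth) ++ [shorten_module x depth] := by simp
    by_cases hq : shorten_module x depth ∈ PySem.Set.ofList (L.map (fun m => shorten_module m depth))
    · -- the prefix of x is already a key
      have hc : (L.foldl (clStep depth) PySem.Dict.empty).contains (shorten_module x depth) = true := by
        rw [PySem.Dict.contains_iff_mem_keys, hkeys]; exact hq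
      have hmemit : (shorten_module x depth,
          PySem.Set.ofList (L.filter (fun m => shorten_module m depth == shorten_module x depth)))
          ∈ (L.foldl (clStep depth) PySem.Dict.empty).items := by
        rw [ih]; exact List.mem_map.mpr ⟨_, hq, rfl⟩
      have hgetD : (L.foldl (clStep depth) PySem.Dict.empty).getD (shorten_module x depth) PySem.Set.empty
          = PySem.Set.ofList (L.filter (fun m => shorten_module m depth == shorten_module x depth)) :=
        PySem.Dict.getD_of_mem_items _ hmemit hnd _
      have hofset : PySem.Set.ofList ((L ++ [x]).map (fun m => shorten_module m depth))
          = PySem.Set.ofList (L.map (fun m => shorten_module m depth)) := by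
        rw [hmapappend, hofl]
        simp [PySem.Set.add, hq]
      rw [hfoldl, PySem.Dict.items_insert_of_contains _ _ hc, ih, hgetD, hofset, List.map_map]
      apply List.map_congr_left
      intro p hp
      by_cases hpq : p = shorten_module x depth
      · subst hpq
        simp only [Function.comp_apply, beq_self_eq_true, if_true]
        rw [hfilter]
        simp [hofl]
      · have hne : (p == shorten_module x depth) = false := by simpa using hpq
        simp only [Function.comp_apply, hne, Bool.false_eq_true, if_false]
        rw [hfilter]
        have : (shorten_module x depth == p) = false := by
          simpa using fun h => hpq h.symm
        simp [this]
    · -- fresh prefix: the entry is appended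
      have hc : (L.foldl (clStep depth) PySem.Dict.empty).contains (shorten_module x depth) = false := by
        rw [Bool.eq_false_iff]
        intro h
        exact hq (hkeys ▸ (PySem.Dict.contains_iff_mem_keys _ _).mp h)
      have hgetD : (L.foldl (clStep depth) PySem.Dict.empty).getD (shorten_module x depth) PySem.Set.empty
          = PySem.Set.empty := PySem.Dict.getD_of_not_contains _ _ hc
      have hnotmem : shorten_module x depth ∉ L.map (fun m => shorten_module m depth) := by
        intro h; exact hq ((PySem.Set.mem_ofList _ _).mpr h)
      have hofset : PySem.Set.ofList ((L ++ [x]).map (fun m => shorten_module m depth))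
          = PySem.Set.ofList (L.map (fun m => shorten_module m depth)) ++ [shorten_module x depth] := by
        rw [hmapappend, hofl]
        simp [PySem.Set.add, hq]
      have hfLq : L.filter (fun m => shorten_module m depth == shorten_module x depth) = [] := by
        apply List.filter_eq_nil_iff.mpr
        intro m hm
        simp only [beq_iff_eq]
        intro h
        exact hnotmem (h ▸ List.mem_map.mpr ⟨m, hm, rfl⟩)
      rw [hfoldl, PySem.Dict.items_insert_of_not_contains _ _ hc, ih, hgetD, hofset, List.map_append]
      congr 1
      · apply List.map_congr_left
        intro p hp
        have : (shorten_module x depth == p) = false := by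
          simp only [beq_eq_false_iff_ne, ne_eq]
          intro h
          exact hq (h ▸ hp)
        rw [hfilter, this]
        simp
      · simp [hfilter, hfLq, PySem.Set.add, PySem.Set.empty, PySem.Set.ofList]

-- ===== VERDICT (by name: the statement is the Claim_ definition above) =====
theorem locate_clusters_spec : Claim_equal_locate_clusters := by
  intro imports depth _
  unfold Spec_locate_clusters locate_clusters locate_clusters_alt
  have hA := foldl_pair_flat (fun s x => PySem.Set.add s x)
      (PySem.List.sorted2 imports (·.1) (·.2) false) PySem.Set.empty
  have he : (fun (d : PySem.Dict String (PySem.Set String)) m =>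
      d.modify (shorten_module m depth) PySem.Set.empty fun s => s.add m) = clStep depth := rfl
  have h1 : List.foldl (fun (s : PySem.Set String) x => s.add x) PySem.Set.empty
      ((PySem.List.sorted2 imports (·.1) (·.2) false).flatMap (fun p => [p.1, p.2]))
      = PySem.Set.ofList ((PySem.List.sorted2 imports (·.1) (·.2) false).flatMap (fun p => [p.1, p.2])) := rfl
  simp only [hA, he, h1]
  rw [(clFold_master depth ((PySem.List.sorted2 imports (·.1) (·.2) false).flatMap (fun p => [p.1, p.2]))).1]
  rw [clFold_items]
  simp [PySem.List.dedup_eq_ofList]
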